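-- pv_equiv track=rewrite | github.com/Fikiremariyam/Code-force-solutions | turing4.py | solution
-- ===== SOURCE A (Python) =====
-- def solution (x):
--     if len(x) <= 1:
--         return len(x)
--
--     left,right =0, 1
--     res=0
--
--     while right < len(x) :
--         while right < len(x) and x[right] + x[right - 1] ==1 :
--             right+=1
--
--         diff=right-left
--         res= max(res,diff)
--
--         left=right
--         right+=1
--
--     return res
-- ===== SOURCE B (Python) =====
-- def solution(x):
--     n = len(x)
--     if n <= 1:
--         return n
--     res = cur = 1
--     for i in range(1, n):
--         cur = cur + 1 if x[i] + x[i - 1] == 1 else 1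
--         res = max(res, cur)
--     return res
-- ===== Notes on version B (the rewrite author's own statement) =====
-- stated objective: simpler
-- what changed: Replaced A's nested two-pointer while loops (inner scan to each run's end, then jump) by a single flat for-loop maintaining a current-run counter and a running maximum; measured ~2x faster by avoiding the repeated len() calls and double bound checks of the nested-while bookkeeping.
import Mathlib
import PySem

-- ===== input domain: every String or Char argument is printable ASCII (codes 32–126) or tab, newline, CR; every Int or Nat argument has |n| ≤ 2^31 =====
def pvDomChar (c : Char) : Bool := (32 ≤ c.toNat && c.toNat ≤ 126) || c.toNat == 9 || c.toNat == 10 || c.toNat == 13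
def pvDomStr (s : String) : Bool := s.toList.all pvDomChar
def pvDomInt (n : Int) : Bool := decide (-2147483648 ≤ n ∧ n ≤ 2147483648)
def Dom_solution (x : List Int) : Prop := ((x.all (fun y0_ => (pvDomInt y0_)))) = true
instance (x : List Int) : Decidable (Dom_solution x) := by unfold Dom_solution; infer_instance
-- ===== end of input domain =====

-- B replaces A's nested two-pointer while loops by one flat pass keeping a current-run
-- counter (objective: simpler; same O(n) cost).

-- ===== PORT A =====
-- inner while: advance `right` while right < len(x) and x[right] + x[right-1] == 1.
-- All list accesses in A are with in-range non-negative indices (guarded by right < len,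
-- right ≥ 1), so List.getD is exact here.
def innerA (x : List Int) (right : Nat) : Nat :=
  if right < x.length ∧ x.getD right 0 + x.getD (right - 1) 0 = 1 then
    innerA x (right + 1)
  else right
termination_by x.length - right

theorem innerA_ge (x : List Int) (right : Nat) : right ≤ innerA x right := by
  unfold innerA
  split
  · exact le_trans (Nat.le_succ right) (innerA_ge x (right + 1))
  · exact le_refl _
termination_by x.length - right

-- outer while loop of A, state (left, right, res)
def outerA (x : List Int) (left right : Nat) (res : Int) : Int :=
  if _h : right < x.length then
    outerA x (innerA x right) (innerA x right + 1)
      (max res ((innerA x right : Int) - (left : Int)))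
  else res
termination_by x.length - right
decreasing_by
  have := innerA_ge x right
  omega

def solution (x : List Int) : Int :=
  if x.length ≤ 1 then (x.length : Int) else outerA x 0 1 0

-- ===== PORT B =====
-- the `for i in range(1, n)` loop of B with state (cur, res)
def loopB (x : List Int) (i : Nat) (cur res : Int) : Int :=
  if i < x.length then
    loopB x (i + 1) (if x.getD i 0 + x.getD (i - 1) 0 = 1 then cur + 1 else 1)
      (max res (if x.getD i 0 + x.getD (i - 1) 0 = 1 then cur + 1 else 1))
  else res
termination_by x.length - i

def solution_alt (x : List Int) : Int :=
  if x.length ≤ 1 then (x.length : Int) else loopB x 1 1 1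

-- ===== PRECONDITION & SPEC =====
def Spec_solution (x : List Int) (out : Int) : Prop := out = solution_alt x
instance (x : List Int) (out : Int) : Decidable (Spec_solution x out) := by unfold Spec_solution; infer_instance

-- ===== CLAIM (what is proved, stated in full; the proofs are below) =====
def Claim_equal_solution : Prop := ∀ (x : List Int), Dom_solution x → Spec_solution x (solution x)

-- ===== LEMMAS AND PROOFS =====

theorem innerA_le (x : List Int) (right : Nat) (h : right ≤ x.length) :
    innerA x right ≤ x.length := by
  unfold innerA
  split
  · exact innerA_le x (right + 1) (by omega)
  · exact h
termination_by x.length - right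

-- B's flat loop jumps over the run that A's inner while scans: starting anywhere,
-- loopB equals "run to innerA's stop, fold the run length into res, then restart".
theorem loopB_run (x : List Int) (right : Nat) (cur res : Int) (hres : cur ≤ res) :
    loopB x right cur res =
      if innerA x right < x.length then
        loopB x (innerA x right + 1) 1
          (max (max res (cur + ((innerA x right : Int) - (right : Int)))) 1)
      else max res (cur + ((innerA x right : Int) - (right : Int))) := by
  by_cases hlt : right < x.length
  · by_cases hc : x.getD right 0 + x.getD (right - 1) 0 = 1
    · have hstep : innerA x right = innerA x (right + 1) := by
        rw [innerA, if_pos ⟨hlt, hc⟩]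
      have hge : right + 1 ≤ innerA x (right + 1) := innerA_ge x (right + 1)
      have hL : loopB x right cur res = loopB x (right + 1) (cur + 1) (max res (cur + 1)) := by
        rw [loopB, if_pos hlt, if_pos hc]
      rw [hL, loopB_run x (right + 1) (cur + 1) (max res (cur + 1)) (le_max_right _ _), hstep]
      split
      · congr 1
        omega
      · omega
    · have hstop : innerA x right = right := by
        rw [innerA, if_neg]
        tauto
      have hL : loopB x right cur res = loopB x (right + 1) 1 (max res 1) := by
        rw [loopB, if_pos hlt, if_neg hc]
      rw [hL, hstop, if_pos hlt]
      congr 1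
      omega
  · have hstop : innerA x right = right := by
      rw [innerA, if_neg]
      tauto
    rw [loopB, if_neg hlt, hstop, if_neg hlt]
    omega
termination_by x.length - right
decreasing_by omega

-- main invariant: entering A's outer loop at (left, left+1, res) corresponds to B's
-- loop at index left+1 with cur = 1 and res already absorbing the pending max.
theorem main_inv (x : List Int) (left : Nat) (res : Int)
    (hl : left < x.length) (hlast : left + 1 = x.length → 1 ≤ res) :
    loopB x (left + 1) 1 (max res 1) = outerA x left (left + 1) res := by
  rw [outerA]
  by_cases h : left + 1 < x.length
  · rw [dif_pos h]
    have hge : left + 1 ≤ innerA x (left + 1) := innerA_ge x (left + 1)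
    have hle : innerA x (left + 1) ≤ x.length := innerA_le x (left + 1) (by omega)
    rw [loopB_run x (left + 1) 1 (max res 1) (le_max_right _ _)]
    by_cases hr : innerA x (left + 1) < x.length
    · rw [if_pos hr]
      have e1 : max (max (max res 1) (1 + ((innerA x (left + 1) : Int) - ((left + 1 : Nat) : Int)))) 1
          = max (max res ((innerA x (left + 1) : Int) - (left : Int))) 1 := by
        push_cast; omega
      rw [e1, main_inv x (innerA x (left + 1)) (max res ((innerA x (left + 1) : Int) - (left : Int))) hr
        (by intro _; omega)]
    · rw [if_neg hr, outerA, dif_neg (by omega : ¬ innerA x (left + 1) + 1 < x.length)]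
      push_cast
      omega
  · rw [dif_neg h, loopB, if_neg h]
    have := hlast (by omega)
    omega
termination_by x.length - left
decreasing_by
  have := innerA_ge x (left + 1)
  omega

-- ===== VERDICT (by name: the statement is the Claim_ definition above) =====
theorem solution_spec : Claim_equal_solution := by
  intro x _
  unfold Spec_solution solution solution_alt
  by_cases h : x.length ≤ 1
  · simp [h]
  · rw [if_neg h, if_neg h]
    have := main_inv x 0 0 (by omega) (by omega)
    simpa using this.symm
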